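-- pv_equiv track=rewrite | github.com/aws-samples/siem-on-amazon-opensearch-service | source/lambda/es_loader/siem/__init__.py | split_logs
-- ===== SOURCE A (Python) =====
-- def split_logs(log_count, max_log_count):
--     q, mod = divmod(log_count, max_log_count)
--     if mod != 0:
--         q = q + 1
--     splite_logs_list = []
--     for x in range(q):
--         if x == 0:
--             start = 1
--         else:
--             start = x * max_log_count + 1
--         end = (x + 1) * max_log_count
--         if (x == q - 1) and (mod != 0):
--             end = x * max_log_count + mod
--         splite_logs_list.append((start, end))
--     return splite_logs_list
-- ===== SOURCE B (Python) =====
-- def split_logs(log_count, max_log_count):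
--     # Build the ranges from the last chunk backwards: each chunk's start is its
--     # end snapped down to the chunk grid, then reverse the collected list.
--     out = []
--     end = log_count
--     while end >= 1:
--         start = max_log_count * ((end - 1) // max_log_count) + 1
--         out.append((start, end))
--         end = start - 1
--     return list(reversed(out))
-- ===== Notes on version B (the rewrite author's own statement) =====
-- stated objective: alternative
-- what changed: Instead of computing a divmod chunk count and iterating chunk indices forward with first/last special cases, B builds the ranges back-to-front, snapping each chunk start to the grid with one floor division and reversing at the end; Pre_ excludes max_log_count <= 0, where A raises ZeroDivisionError (at 0) or, for negative chunk sizes, returns descending ranges that are an accident of its floor-division arithmetic while B diverges or returns [].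
-- outside the precondition, e.g. on split_logs(7, -3): A returns [], B does not finish within the time limit; on split_logs(-7, -3): A returns [(1, -3), (-2, -6), (-5, -7)], B returns []
import Mathlib
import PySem

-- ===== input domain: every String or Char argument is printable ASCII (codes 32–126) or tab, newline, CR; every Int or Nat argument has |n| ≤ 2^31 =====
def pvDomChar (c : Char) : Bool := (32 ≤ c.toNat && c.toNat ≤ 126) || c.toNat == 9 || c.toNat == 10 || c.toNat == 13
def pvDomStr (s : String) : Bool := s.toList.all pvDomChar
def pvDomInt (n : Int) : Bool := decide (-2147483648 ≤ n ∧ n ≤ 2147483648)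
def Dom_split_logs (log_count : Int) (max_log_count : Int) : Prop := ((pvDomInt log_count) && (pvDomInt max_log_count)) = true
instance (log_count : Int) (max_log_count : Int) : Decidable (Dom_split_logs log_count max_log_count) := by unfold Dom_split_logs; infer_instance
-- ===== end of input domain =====

-- B builds the chunk ranges back-to-front, snapping each start to the grid with one
-- floor division and reversing at the end (objective: alternative algorithm, same cost).

-- ===== PORT A =====
def split_logs (log_count : Int) (max_log_count : Int) : List (Int × Int) :=
  match PySem.Int.divmod? log_count max_log_count with
  | none => []   -- unreachable under Pre_ (Python raises ZeroDivisionError here)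
  | some (q0, md) =>
    let q := if md ≠ 0 then q0 + 1 else q0
    (PySem.List.pyRange 0 q 1).foldl (fun acc x =>
      let start := if x = 0 then (1 : Int) else x * max_log_count + 1
      let e0 := (x + 1) * max_log_count
      let e := if x = q - 1 ∧ md ≠ 0 then x * max_log_count + md else e0
      acc ++ [(start, e)]) []

-- ===== PORT B =====
-- Python's 'while end >= 1' loop; 'fuel' is a totality device only: under Pre_
-- (0 < max_log_count) each iteration decreases 'e' by at least 1, so fuel = e.toNat
-- never runs out; for max_log_count ≤ 0 the Python loop diverges or raises (outside Pre_).
def splitB_go (m : Int) (fuel : Nat) (e : Int) (out : List (Int × Int)) : List (Int × Int) :=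
  match fuel with
  | 0 => out
  | fuel + 1 =>
    if 1 ≤ e then
      let start := m * PySem.Int.floordiv (e - 1) m + 1
      splitB_go m fuel (start - 1) (out ++ [(start, e)])
    else out

def split_logs_alt (log_count : Int) (max_log_count : Int) : List (Int × Int) :=
  (splitB_go max_log_count log_count.toNat log_count []).reverse

-- ===== PRECONDITION & SPEC =====
-- Pre_ excludes max_log_count ≤ 0: at 0 A raises ZeroDivisionError, and a non-positive
-- chunk size is outside the splitter's purpose — A's descending ranges for negative
-- max_log_count are an accident of its floor-division arithmetic (B diverges or returns []).
def Pre_split_logs (log_count : Int) (max_log_count : Int) : Prop := 0 < max_log_count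
instance (log_count : Int) (max_log_count : Int) : Decidable (Pre_split_logs log_count max_log_count) := by unfold Pre_split_logs; infer_instance
def pvWitness_split_logs : Int × Int := (7, 3)

def Spec_split_logs (log_count : Int) (max_log_count : Int) (out : List (Int × Int)) : Prop := out = split_logs_alt log_count max_log_count
instance (log_count : Int) (max_log_count : Int) (out : List (Int × Int)) : Decidable (Spec_split_logs log_count max_log_count out) := by unfold Spec_split_logs; infer_instance

-- ===== CLAIM (what is proved, stated in full; the proofs are below) =====
def Claim_equal_split_logs : Prop := ∀ (log_count : Int) (max_log_count : Int), Dom_split_logs log_count max_log_count → Pre_split_logs log_count max_log_count → Spec_split_logs log_count max_log_count (split_logs log_count max_log_count)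

-- ===== LEMMAS AND PROOFS =====

-- the common normal form both programs are reduced to: number of chunks and k-th chunk
def Ncnt (e m : Int) : Nat := if 0 < e then ((e + m - 1) / m).toNat else 0
def fchunk (e m : Int) (k : Nat) : Int × Int := (1 + m * (k : Int), min (1 + m * (k : Int) + m - 1) e)

-- flatMap of a singleton-producing function is a map
theorem flatMap_singleton_eq_map {α β : Type} (f : α → β) (l : List α) :
    l.flatMap (fun x => [f x]) = l.map f := by
  induction l with
  | nil => rfl
  | cons a t ih => simp [List.flatMap_cons, ih]

-- A's loop, written as a plain map over range q
theorem split_logs_eq_map (lc m : Int) (hm : m ≠ 0) :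
    split_logs lc m =
      (List.range (if PySem.Int.mod lc m ≠ 0 then PySem.Int.floordiv lc m + 1
                   else PySem.Int.floordiv lc m).toNat).map
        (fun (k : Nat) =>
          ((if (k : Int) = 0 then (1 : Int) else (k : Int) * m + 1),
           (if (k : Int) = (if PySem.Int.mod lc m ≠ 0 then PySem.Int.floordiv lc m + 1
                            else PySem.Int.floordiv lc m) - 1 ∧ PySem.Int.mod lc m ≠ 0
            then (k : Int) * m + PySem.Int.mod lc m else ((k : Int) + 1) * m))) := by
  unfold split_logs
  simp only [PySem.Int.divmod?, if_neg hm]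
  rw [PySem.List.foldl_append_eq_flatMap]
  rw [PySem.List.pyRange_one]
  rw [List.flatMap_map, flatMap_singleton_eq_map]
  simp only [List.nil_append, sub_zero]
  refine List.map_congr_left (fun k _ => ?_)
  simp [PySem.Int.floordiv, PySem.Int.mod]

-- chunk count: A's divmod-based count equals the ceil-division count (positive divisor)
theorem count_eq (lc m : Int) (hm : 0 < m) :
    (if PySem.Int.mod lc m ≠ 0 then PySem.Int.floordiv lc m + 1 else PySem.Int.floordiv lc m).toNat
      = Ncnt lc m := by
  unfold Ncnt
  have hd := PySem.Int.floordiv_mul_add_mod lc m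
  have hr0 : 0 ≤ PySem.Int.mod lc m := by
    rw [PySem.Int.mod_eq_emod_of_pos hm]; exact Int.emod_nonneg lc (by omega)
  have hr1 : PySem.Int.mod lc m < m := by
    rw [PySem.Int.mod_eq_emod_of_pos hm]; exact Int.emod_lt_of_pos lc hm
  set q0 := PySem.Int.floordiv lc m with hq0
  set r := PySem.Int.mod lc m with hrdef
  by_cases hr : r = 0
  · rw [if_neg (by simp [hr])]
    by_cases hlc : 0 < lc
    · rw [if_pos hlc, (PySem.Int.floordiv_eq_ediv_of_pos hm).symm]
      have : PySem.Int.floordiv (lc + m - 1) m = q0 := by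
        rw [PySem.Int.floordiv_eq_iff_of_pos hm]
        have h1 : (q0 + 1) * m = q0 * m + m := by ring
        constructor <;> [linarith; linarith [h1]]
      rw [this]
    · rw [if_neg hlc]
      have hq0le : q0 ≤ 0 := by
        by_contra hq
        have h1 : 1 ≤ q0 := by omega
        have h2 : (1 : Int) * m ≤ q0 * m :=
          mul_le_mul_of_nonneg_right h1 (le_of_lt hm)
        linarith
      omega
  · have hr' : 1 ≤ r := by omega
    rw [if_pos (by simp [hr])]
    by_cases hlc : 0 < lc
    · rw [if_pos hlc, (PySem.Int.floordiv_eq_ediv_of_pos hm).symm]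
      have : PySem.Int.floordiv (lc + m - 1) m = q0 + 1 := by
        rw [PySem.Int.floordiv_eq_iff_of_pos hm]
        have h1 : (q0 + 1) * m = q0 * m + m := by ring
        have h2 : (q0 + 1 + 1) * m = q0 * m + m + m := by ring
        constructor <;> [linarith [h1]; linarith [h2]]
      rw [this]
    · rw [if_neg hlc]
      have hq0le : q0 + 1 ≤ 0 := by
        by_contra hq
        have h1 : 0 ≤ q0 := by omega
        have h2 : 0 ≤ q0 * m := mul_nonneg h1 (le_of_lt hm)
        linarith
      omega

-- agreement of A's per-chunk pairs with the normal form, positive divisor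
theorem entry_eq_pos (lc m : Int) (hm : 0 < m) (k : Nat)
    (hk : (k : Int) < (if PySem.Int.mod lc m ≠ 0 then PySem.Int.floordiv lc m + 1
                       else PySem.Int.floordiv lc m)) :
    ((if (k : Int) = 0 then (1 : Int) else (k : Int) * m + 1),
     (if (k : Int) = (if PySem.Int.mod lc m ≠ 0 then PySem.Int.floordiv lc m + 1
                      else PySem.Int.floordiv lc m) - 1 ∧ PySem.Int.mod lc m ≠ 0
      then (k : Int) * m + PySem.Int.mod lc m else ((k : Int) + 1) * m))
      = fchunk lc m k := by
  unfold fchunk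
  have hd := PySem.Int.floordiv_mul_add_mod lc m
  have hr0 : 0 ≤ PySem.Int.mod lc m := by
    rw [PySem.Int.mod_eq_emod_of_pos hm]; exact Int.emod_nonneg lc (by omega)
  have hr1 : PySem.Int.mod lc m < m := by
    rw [PySem.Int.mod_eq_emod_of_pos hm]; exact Int.emod_lt_of_pos lc hm
  set q0 := PySem.Int.floordiv lc m with hq0
  set r := PySem.Int.mod lc m with hrdef
  have hfst : (if (k : Int) = 0 then (1 : Int) else (k : Int) * m + 1) = 1 + m * (k : Int) := by
    by_cases h0 : (k : Int) = 0
    · simp [h0]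
    · rw [if_neg h0]; ring
  refine Prod.ext hfst ?_
  simp only
  rw [(by ring : 1 + m * (k : Int) + m - 1 = ((k : Int) + 1) * m)]
  by_cases hr : r = 0
  · rw [if_neg (by simp [hr])]
    rw [if_neg (by simp [hr] : ¬ r ≠ 0)] at hk
    have hle : ((k : Int) + 1) * m ≤ lc := by
      have h1 : ((k : Int) + 1) * m ≤ q0 * m :=
        mul_le_mul_of_nonneg_right (by omega) (le_of_lt hm)
      linarith
    rw [min_eq_left hle]
  · have hr' : 1 ≤ r := by omega
    rw [if_pos (by simp [hr] : r ≠ 0)] at hk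
    by_cases hk0 : (k : Int) = q0
    · rw [if_pos ⟨by rw [if_pos (by simp [hr] : r ≠ 0)]; omega, by simp [hr]⟩]
      have hge : lc ≤ ((k : Int) + 1) * m := by
        have h1 : ((k : Int) + 1) * m = q0 * m + m := by rw [hk0]; ring
        linarith
      rw [min_eq_right hge, hk0]
      linarith
    · rw [if_neg (by rw [if_pos (by simp [hr] : r ≠ 0)]; exact fun h => hk0 (by omega))]
      have hle : ((k : Int) + 1) * m ≤ lc := by
        have h1 : ((k : Int) + 1) * m ≤ q0 * m :=
          mul_le_mul_of_nonneg_right (by omega) (le_of_lt hm)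
        linarith
      rw [min_eq_left hle]

-- B's backwards loop accumulates exactly the reversed normal form
theorem splitB_go_eq (m : Int) (hm : 0 < m) :
    ∀ (fuel : Nat) (e : Int), e.toNat ≤ fuel → ∀ (out : List (Int × Int)),
      splitB_go m fuel e out = out ++ ((List.range (Ncnt e m)).map (fchunk e m)).reverse := by
  intro fuel
  induction fuel with
  | zero =>
    intro e he out
    have hN : Ncnt e m = 0 := by unfold Ncnt; rw [if_neg (by omega)]
    simp [splitB_go, hN]
  | succ n ih =>
    intro e he out
    by_cases h1 : 1 ≤ e
    · have hde : PySem.Int.floordiv (e - 1) m = (e - 1) / m :=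
        PySem.Int.floordiv_eq_ediv_of_pos hm
      set d := (e - 1) / m with hddef
      have hr0 : 0 ≤ (e - 1) % m := Int.emod_nonneg (e - 1) (by omega)
      have hr1 : (e - 1) % m < m := Int.emod_lt_of_pos (e - 1) hm
      have hdm : m * d + (e - 1) % m = e - 1 := Int.mul_ediv_add_emod (e - 1) m
      have hd0 : 0 ≤ d := Int.ediv_nonneg (by omega) (by omega)
      have hmd0 : 0 ≤ m * d := mul_nonneg (by omega) hd0
      have hmd_le : m * d ≤ e - 1 := by omega
      have hmd_ge : e - 1 < m * d + m := by omega
      show (if 1 ≤ e then splitB_go m n (m * PySem.Int.floordiv (e - 1) m + 1 - 1)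
              (out ++ [(m * PySem.Int.floordiv (e - 1) m + 1, e)]) else out)
           = out ++ ((List.range (Ncnt e m)).map (fchunk e m)).reverse
      rw [if_pos h1, hde]
      rw [show m * d + 1 - 1 = m * d by ring]
      rw [ih (m * d) (by omega) _]
      -- counts
      have hNsub : Ncnt (m * d) m = d.toNat := by
        unfold Ncnt
        by_cases hd' : 0 < m * d
        · rw [if_pos hd']
          have hdpos : 0 < d := by
            by_contra h
            have : d = 0 := by omega
            simp [this] at hd'
          have hq : (m * d + m - 1) / m = d := by
            rw [← PySem.Int.floordiv_eq_ediv_of_pos hm,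
                PySem.Int.floordiv_eq_iff_of_pos hm]
            have e1 : d * m = m * d := by ring
            have e2 : (d + 1) * m = m * d + m := by ring
            omega
          rw [hq]
        · rw [if_neg hd']
          have hdz : d = 0 := by
            by_contra h
            have h1' : 1 ≤ d := by omega
            have : (1 : Int) * m ≤ d * m := mul_le_mul_of_nonneg_right h1' (by omega)
            nlinarith
          omega
      have hNe : Ncnt e m = d.toNat + 1 := by
        unfold Ncnt
        rw [if_pos (by omega)]
        have hq : (e + m - 1) / m = d + 1 := by
          rw [← PySem.Int.floordiv_eq_ediv_of_pos hm,
              PySem.Int.floordiv_eq_iff_of_pos hm]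
          have e1 : (d + 1) * m = m * d + m := by ring
          have e2 : (d + 1 + 1) * m = m * d + m + m := by ring
          omega
        rw [hq]; omega
      rw [hNe, hNsub, List.range_succ, List.map_append, List.reverse_append]
      have hlast : fchunk e m d.toNat = (m * d + 1, e) := by
        unfold fchunk
        have hcast : (d.toNat : Int) = d := by omega
        rw [hcast]
        refine Prod.ext (by simp; ring) ?_
        simp only
        rw [min_eq_right (by omega : e ≤ 1 + m * d + m - 1)]
      have hbody : (List.range d.toNat).map (fchunk e m)
          = (List.range d.toNat).map (fchunk (m * d) m) := by
        refine List.map_congr_left (fun k hk => ?_)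
        rw [List.mem_range] at hk
        unfold fchunk
        have hkle : (k : Int) + 1 ≤ d := by omega
        have hle : m * ((k : Int) + 1) ≤ m * d := mul_le_mul_of_nonneg_left hkle (by omega)
        have harg : 1 + m * (k : Int) + m - 1 = m * ((k : Int) + 1) := by ring
        refine Prod.ext rfl ?_
        simp only
        rw [harg, min_eq_left (by omega), min_eq_left (by omega)]
      rw [hbody]
      simp only [List.reverse_cons, List.reverse_nil, List.nil_append, List.map_cons,
        List.map_nil, List.append_assoc, List.cons_append]
      rw [hlast]
    · have hN : Ncnt e m = 0 := by unfold Ncnt; rw [if_neg (by omega)]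
      show (if 1 ≤ e then _ else out) = out ++ ((List.range (Ncnt e m)).map (fchunk e m)).reverse
      rw [if_neg h1, hN]
      simp

-- ===== VERDICT (by name: the statement is the Claim_ definition above) =====
theorem split_logs_spec : Claim_equal_split_logs := by
  intro lc m _ hm
  have hm' : (0 : Int) < m := hm
  unfold Spec_split_logs split_logs_alt
  rw [splitB_go_eq m hm' lc.toNat lc le_rfl []]
  rw [List.nil_append, List.reverse_reverse]
  rw [split_logs_eq_map lc m (by omega)]
  have hc := count_eq lc m hm'
  rw [hc]
  refine List.map_congr_left (fun k hk => ?_)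
  rw [List.mem_range] at hk
  refine entry_eq_pos lc m hm' k ?_
  omega
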